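-- pv_equiv track=rewrite | github.com/jl33-ai/um-wam | utils/math.py | get_letter_grade_freq
-- ===== SOURCE A (Python) =====
-- def get_letter_grade_freq(grades):
--     freq_dict = {'H1': 0, 'H2A': 0, 'H2B': 0, 'H3': 0, 'P': 0, 'N': 0, '*': 0}
--     maximum_g = 0
--     minimum_g = 100
--
--     for g in grades:
--         freq_dict[get_letter_grade(g['grade'])] += 1
--         if g['grade'] > maximum_g:
--             maximum_g = g['grade']
--         if g['grade'] < minimum_g:
--             minimum_g = g['grade']
--
--     return freq_dict, maximum_g, minimum_g
--
-- def get_letter_grade(g):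
--     if g >= 80:
--         return 'H1'
--     elif g >= 75:
--         return 'H2A'
--     elif g >= 70:
--         return 'H2B'
--     elif g >= 65:
--         return 'H3'
--     elif g >= 50:
--         return 'P'
--     elif g == 0:
--         return '*'
--     else:
--         return 'N'
-- ===== SOURCE B (Python) =====
-- # B: no per-grade letter classification at all. Each bucket of the frequency dict is
-- # computed as a difference of cumulative "how many grades fall below x" aggregates
-- # (H2A = below(80) - below(75), ...), and max/min come from builtins over seeded lists.
-- # Objective: alternative decomposition (aggregate counting), same O(n) cost.
--
-- def _below(vals, x):
--     return sum(1 for v in vals if v < x)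
--
--
-- def get_letter_grade_freq(grades):
--     vals = [g['grade'] for g in grades]
--     n = len(vals)
--     b80 = _below(vals, 80)
--     b75 = _below(vals, 75)
--     b70 = _below(vals, 70)
--     b65 = _below(vals, 65)
--     b50 = _below(vals, 50)
--     z = sum(1 for v in vals if v == 0)
--     freq_dict = {'H1': n - b80, 'H2A': b80 - b75, 'H2B': b75 - b70,
--                  'H3': b70 - b65, 'P': b65 - b50, 'N': b50 - z, '*': z}
--     return freq_dict, max([0] + vals), min([100] + vals)
-- ===== Notes on version B (the rewrite author's own statement) =====
-- stated objective: alternative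
-- what changed: A classifies every grade through the get_letter_grade if-chain and increments a dict while tracking running max/min in one fused loop; B never classifies a grade at all: each frequency bucket is the difference of cumulative 'count of grades below threshold' aggregates (H2A = below(80)-below(75), ...), with a separate zero count and builtin max/min over 0/100-seeded lists.
import Mathlib
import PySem

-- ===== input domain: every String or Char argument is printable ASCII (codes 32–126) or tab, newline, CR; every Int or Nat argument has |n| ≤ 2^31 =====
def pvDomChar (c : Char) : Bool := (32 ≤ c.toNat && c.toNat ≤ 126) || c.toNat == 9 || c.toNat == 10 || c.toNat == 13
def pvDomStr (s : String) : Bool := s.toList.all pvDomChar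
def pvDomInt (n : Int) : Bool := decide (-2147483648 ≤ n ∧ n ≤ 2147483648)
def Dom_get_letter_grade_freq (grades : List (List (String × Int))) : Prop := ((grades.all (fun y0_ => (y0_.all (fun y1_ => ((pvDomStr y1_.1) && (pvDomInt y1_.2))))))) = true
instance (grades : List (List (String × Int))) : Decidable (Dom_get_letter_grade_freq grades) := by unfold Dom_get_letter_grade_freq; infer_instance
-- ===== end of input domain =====

-- B drops A's per-grade letter classification and fused loop entirely: each frequency
-- bucket is a difference of cumulative below-threshold counts, max/min come from builtin
-- max/min over 0/100-seeded value lists; same return value wherever A returns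
-- (objective: alternative decomposition, same cost).

-- ===== PORT A =====
-- g['grade']: first-match dict lookup, total here; Pre_ guarantees the key is present
def gradeOf (g : List (String × Int)) : Int := (PySem.Dict.mk g).getD "grade" 0

def get_letter_grade (g : Int) : String :=
  if g ≥ 80 then "H1" else if g ≥ 75 then "H2A" else if g ≥ 70 then "H2B"
  else if g ≥ 65 then "H3" else if g ≥ 50 then "P" else if g = 0 then "*" else "N"

-- the body of A's for-loop, one grade record at a time
def stepA (st : PySem.Dict String Int × Int × Int) (g : List (String × Int)) :
    PySem.Dict String Int × Int × Int :=
  let v := gradeOf g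
  (st.1.modify (get_letter_grade v) 0 (· + 1),
   if v > st.2.1 then v else st.2.1,
   if v < st.2.2 then v else st.2.2)

def get_letter_grade_freq (grades : List (List (String × Int))) : (List (String × Int)) × Int × Int :=
  let init : PySem.Dict String Int :=
    PySem.Dict.ofList [("H1",0),("H2A",0),("H2B",0),("H3",0),("P",0),("N",0),("*",0)]
  let st := grades.foldl stepA (init, 0, 100)
  (st.1.items, st.2.1, st.2.2)

-- ===== PORT B =====
-- _below(vals, x) = sum(1 for v in vals if v < x); a 0/1-sum IS List.countP
def below (vals : List Int) (x : Int) : Int := (vals.countP (fun v => decide (v < x)) : Int)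

def get_letter_grade_freq_alt (grades : List (List (String × Int))) : (List (String × Int)) × Int × Int :=
  let vals := grades.map gradeOf
  let n : Int := vals.length
  let b80 := below vals 80
  let b75 := below vals 75
  let b70 := below vals 70
  let b65 := below vals 65
  let b50 := below vals 50
  let z : Int := (vals.countP (fun v => v == 0) : Int)
  ([("H1", n - b80), ("H2A", b80 - b75), ("H2B", b75 - b70), ("H3", b70 - b65),
    ("P", b65 - b50), ("N", b50 - z), ("*", z)],
   (PySem.List.max? ((0:Int) :: vals) (fun y => y)).getD 0,
   (PySem.List.min? ((100:Int) :: vals) (fun y => y)).getD 100)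

-- ===== PRECONDITION & SPEC =====
-- Pre_ excludes exactly the inputs where some record lacks the key "grade": there Python A
-- (and B alike) raises KeyError instead of returning.
def Pre_get_letter_grade_freq (grades : List (List (String × Int))) : Prop :=
  ∀ g ∈ grades, "grade" ∈ g.map (·.1)
instance (grades : List (List (String × Int))) : Decidable (Pre_get_letter_grade_freq grades) := by unfold Pre_get_letter_grade_freq; infer_instance

def pvWitness_get_letter_grade_freq : (List (List (String × Int))) :=
  [[("grade", 90)], [("grade", 0)], [("grade", 64)]]

def Spec_get_letter_grade_freq (grades : List (List (String × Int))) (out : (List (String × Int)) × Int × Int) : Prop := out = get_letter_grade_freq_alt grades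
instance (grades : List (List (String × Int))) (out : (List (String × Int)) × Int × Int) : Decidable (Spec_get_letter_grade_freq grades out) := by unfold Spec_get_letter_grade_freq; infer_instance

-- ===== CLAIM =====
def Claim_equal_get_letter_grade_freq : Prop := ∀ (grades : List (List (String × Int))), Dom_get_letter_grade_freq grades → Pre_get_letter_grade_freq grades → Spec_get_letter_grade_freq grades (get_letter_grade_freq grades)

-- ===== LEMMAS AND PROOFS =====

-- the letter is one of the seven template keys
lemma letter_cases (v : Int) : get_letter_grade v = "H1" ∨ get_letter_grade v = "H2A" ∨
    get_letter_grade v = "H2B" ∨ get_letter_grade v = "H3" ∨ get_letter_grade v = "P" ∨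
    get_letter_grade v = "N" ∨ get_letter_grade v = "*" := by
  unfold get_letter_grade; split_ifs <;> simp

-- letter count of a list of records, as an Int
def cnt (L : String) (gs : List (List (String × Int))) : Int :=
  ((gs.map (fun g => get_letter_grade (gradeOf g))).count L : Int)

lemma cnt_nil (L : String) : cnt L [] = 0 := rfl

lemma cnt_cons (L : String) (g : List (String × Int)) (gs : List (List (String × Int))) :
    cnt L (g :: gs) = (if get_letter_grade (gradeOf g) = L then 1 else 0) + cnt L gs := by
  simp only [cnt, List.map_cons, List.count_cons]
  by_cases h : get_letter_grade (gradeOf g) = L <;> simp [h]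
  ring

lemma if_max (M v : Int) : (if v > M then v else M) = max M v := by
  rw [max_def]; split_ifs <;> omega

lemma if_min (m v : Int) : (if v < m then v else m) = min m v := by
  rw [min_def]; split_ifs <;> omega

lemma modify_H1 (c1 c2 c3 c4 c5 c6 c7 : Int) :
    (PySem.Dict.mk [("H1",c1), ("H2A",c2), ("H2B",c3), ("H3",c4), ("P",c5), ("N",c6), ("*",c7)] : PySem.Dict String Int).modify "H1" 0 (· + 1)
    = PySem.Dict.mk [("H1",c1+1), ("H2A",c2), ("H2B",c3), ("H3",c4), ("P",c5), ("N",c6), ("*",c7)] := by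
  simp [PySem.Dict.modify, PySem.Dict.insert, PySem.Dict.getD, PySem.Dict.get?, PySem.Dict.contains]

lemma modify_H2A (c1 c2 c3 c4 c5 c6 c7 : Int) :
    (PySem.Dict.mk [("H1",c1), ("H2A",c2), ("H2B",c3), ("H3",c4), ("P",c5), ("N",c6), ("*",c7)] : PySem.Dict String Int).modify "H2A" 0 (· + 1)
    = PySem.Dict.mk [("H1",c1), ("H2A",c2+1), ("H2B",c3), ("H3",c4), ("P",c5), ("N",c6), ("*",c7)] := by
  simp [PySem.Dict.modify, PySem.Dict.insert, PySem.Dict.getD, PySem.Dict.get?, PySem.Dict.contains]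

lemma modify_H2B (c1 c2 c3 c4 c5 c6 c7 : Int) :
    (PySem.Dict.mk [("H1",c1), ("H2A",c2), ("H2B",c3), ("H3",c4), ("P",c5), ("N",c6), ("*",c7)] : PySem.Dict String Int).modify "H2B" 0 (· + 1)
    = PySem.Dict.mk [("H1",c1), ("H2A",c2), ("H2B",c3+1), ("H3",c4), ("P",c5), ("N",c6), ("*",c7)] := by
  simp [PySem.Dict.modify, PySem.Dict.insert, PySem.Dict.getD, PySem.Dict.get?, PySem.Dict.contains]

lemma modify_H3 (c1 c2 c3 c4 c5 c6 c7 : Int) :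
    (PySem.Dict.mk [("H1",c1), ("H2A",c2), ("H2B",c3), ("H3",c4), ("P",c5), ("N",c6), ("*",c7)] : PySem.Dict String Int).modify "H3" 0 (· + 1)
    = PySem.Dict.mk [("H1",c1), ("H2A",c2), ("H2B",c3), ("H3",c4+1), ("P",c5), ("N",c6), ("*",c7)] := by
  simp [PySem.Dict.modify, PySem.Dict.insert, PySem.Dict.getD, PySem.Dict.get?, PySem.Dict.contains]

lemma modify_P (c1 c2 c3 c4 c5 c6 c7 : Int) :
    (PySem.Dict.mk [("H1",c1), ("H2A",c2), ("H2B",c3), ("H3",c4), ("P",c5), ("N",c6), ("*",c7)] : PySem.Dict String Int).modify "P" 0 (· + 1)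
    = PySem.Dict.mk [("H1",c1), ("H2A",c2), ("H2B",c3), ("H3",c4), ("P",c5+1), ("N",c6), ("*",c7)] := by
  simp [PySem.Dict.modify, PySem.Dict.insert, PySem.Dict.getD, PySem.Dict.get?, PySem.Dict.contains]

lemma modify_N (c1 c2 c3 c4 c5 c6 c7 : Int) :
    (PySem.Dict.mk [("H1",c1), ("H2A",c2), ("H2B",c3), ("H3",c4), ("P",c5), ("N",c6), ("*",c7)] : PySem.Dict String Int).modify "N" 0 (· + 1)
    = PySem.Dict.mk [("H1",c1), ("H2A",c2), ("H2B",c3), ("H3",c4), ("P",c5), ("N",c6+1), ("*",c7)] := by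
  simp [PySem.Dict.modify, PySem.Dict.insert, PySem.Dict.getD, PySem.Dict.get?, PySem.Dict.contains]

lemma modify_star (c1 c2 c3 c4 c5 c6 c7 : Int) :
    (PySem.Dict.mk [("H1",c1), ("H2A",c2), ("H2B",c3), ("H3",c4), ("P",c5), ("N",c6), ("*",c7)] : PySem.Dict String Int).modify "*" 0 (· + 1)
    = PySem.Dict.mk [("H1",c1), ("H2A",c2), ("H2B",c3), ("H3",c4), ("P",c5), ("N",c6), ("*",c7+1)] := by
  simp [PySem.Dict.modify, PySem.Dict.insert, PySem.Dict.getD, PySem.Dict.get?, PySem.Dict.contains]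

-- the loop invariant: folding A's step over gs from a literal template state
lemma loopA (gs : List (List (String × Int))) (c1 c2 c3 c4 c5 c6 c7 M m : Int) :
    gs.foldl stepA
      (PySem.Dict.mk [("H1",c1),("H2A",c2),("H2B",c3),("H3",c4),("P",c5),("N",c6),("*",c7)], M, m)
    = (PySem.Dict.mk [("H1",c1 + cnt "H1" gs),("H2A",c2 + cnt "H2A" gs),("H2B",c3 + cnt "H2B" gs),
        ("H3",c4 + cnt "H3" gs),("P",c5 + cnt "P" gs),("N",c6 + cnt "N" gs),("*",c7 + cnt "*" gs)],
       (gs.map gradeOf).foldl max M, (gs.map gradeOf).foldl min m) := by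
  induction gs generalizing c1 c2 c3 c4 c5 c6 c7 M m with
  | nil => simp [cnt_nil]
  | cons g gs ih =>
    simp only [List.foldl_cons, List.map_cons]
    have hstep : stepA
        (PySem.Dict.mk [("H1",c1),("H2A",c2),("H2B",c3),("H3",c4),("P",c5),("N",c6),("*",c7)], M, m) g
        = ((PySem.Dict.mk [("H1",c1),("H2A",c2),("H2B",c3),("H3",c4),("P",c5),("N",c6),("*",c7)]
            : PySem.Dict String Int).modify (get_letter_grade (gradeOf g)) 0 (· + 1),
           max M (gradeOf g), min m (gradeOf g)) := by
      simp only [stepA, if_max, if_min]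
    rw [hstep]
    rcases letter_cases (gradeOf g) with h | h | h | h | h | h | h
    · rw [h, modify_H1, ih]; simp [cnt_cons, h]; ring_nf
    · rw [h, modify_H2A, ih]; simp [cnt_cons, h]; ring_nf
    · rw [h, modify_H2B, ih]; simp [cnt_cons, h]; ring_nf
    · rw [h, modify_H3, ih]; simp [cnt_cons, h]; ring_nf
    · rw [h, modify_P, ih]; simp [cnt_cons, h]; ring_nf
    · rw [h, modify_N, ih]; simp [cnt_cons, h]; ring_nf
    · rw [h, modify_star, ih]; simp [cnt_cons, h]; ring_nf

-- counting arithmetic: subtracting a sub-count leaves the relative complement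
lemma countP_sub (l : List Int) (p q : Int → Bool) (h : ∀ v, q v = true → p v = true) :
    (l.countP p : Int) - (l.countP q : Int) = (l.countP (fun v => p v && !q v) : Int) := by
  induction l with
  | nil => simp
  | cons x t ih =>
    simp only [List.countP_cons]
    by_cases hq : q x
    · have hp := h x hq; simp [hq, hp]; omega
    · by_cases hp : p x <;> simp [hq, hp] <;> omega

-- cnt as a countP over the grade values
lemma cnt_eq_countP (L : String) (gs : List (List (String × Int))) :
    cnt L gs = ((gs.map gradeOf).countP (fun v => get_letter_grade v == L) : Int) := by
  simp [cnt, List.count_eq_countP, List.countP_map, Function.comp_def]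

theorem get_letter_grade_freq_spec : Claim_equal_get_letter_grade_freq := by
  intro grades _ _
  unfold Spec_get_letter_grade_freq get_letter_grade_freq get_letter_grade_freq_alt
  dsimp only
  rw [show (PySem.Dict.ofList [("H1",(0:Int)),("H2A",0),("H2B",0),("H3",0),("P",0),("N",0),("*",0)]
      : PySem.Dict String Int)
    = PySem.Dict.mk [("H1",0),("H2A",0),("H2B",0),("H3",0),("P",0),("N",0),("*",0)] from by decide]
  rw [loopA]
  set vals := grades.map gradeOf with hvals
  have hH1 : cnt "H1" grades = (vals.length : Int) - below vals 80 := by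
    rw [cnt_eq_countP, ← hvals]
    have := countP_sub vals (fun _ => true) (fun v => decide (v < 80)) (by intro v _; rfl)
    simp only [List.countP_true] at this
    rw [below, this]
    exact_mod_cast List.countP_congr (fun v _ => by
      unfold get_letter_grade; split_ifs <;> simp <;> omega)
  have hH2A : cnt "H2A" grades = below vals 80 - below vals 75 := by
    rw [cnt_eq_countP, ← hvals, below, below,
        countP_sub vals (fun v => decide (v < 80)) (fun v => decide (v < 75))
          (by intro v hv; simp at *; omega)]
    exact_mod_cast List.countP_congr (fun v _ => by
      unfold get_letter_grade; split_ifs <;> simp <;> omega)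
  have hH2B : cnt "H2B" grades = below vals 75 - below vals 70 := by
    rw [cnt_eq_countP, ← hvals, below, below,
        countP_sub vals (fun v => decide (v < 75)) (fun v => decide (v < 70))
          (by intro v hv; simp at *; omega)]
    exact_mod_cast List.countP_congr (fun v _ => by
      unfold get_letter_grade; split_ifs <;> simp <;> omega)
  have hH3 : cnt "H3" grades = below vals 70 - below vals 65 := by
    rw [cnt_eq_countP, ← hvals, below, below,
        countP_sub vals (fun v => decide (v < 70)) (fun v => decide (v < 65))
          (by intro v hv; simp at *; omega)]
    exact_mod_cast List.countP_congr (fun v _ => by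
      unfold get_letter_grade; split_ifs <;> simp <;> omega)
  have hP : cnt "P" grades = below vals 65 - below vals 50 := by
    rw [cnt_eq_countP, ← hvals, below, below,
        countP_sub vals (fun v => decide (v < 65)) (fun v => decide (v < 50))
          (by intro v hv; simp at *; omega)]
    exact_mod_cast List.countP_congr (fun v _ => by
      unfold get_letter_grade; split_ifs <;> simp <;> omega)
  have hstar : cnt "*" grades = ((vals.countP (fun v => v == 0) : Nat) : Int) := by
    rw [cnt_eq_countP, ← hvals]
    exact_mod_cast List.countP_congr (fun v _ => by
      unfold get_letter_grade; split_ifs <;> simp <;> omega)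
  have hN : cnt "N" grades = below vals 50 - ((vals.countP (fun v => v == 0) : Nat) : Int) := by
    rw [cnt_eq_countP, ← hvals, below,
        countP_sub vals (fun v => decide (v < 50)) (fun v => v == 0)
          (by intro v hv; simp at *; omega)]
    exact_mod_cast List.countP_congr (fun v _ => by
      unfold get_letter_grade; split_ifs <;> simp <;> omega)
  simp [PySem.List.max?_id_cons, PySem.List.min?_id_cons,
        hH1, hH2A, hH2B, hH3, hP, hstar, hN]
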